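-- pv_equiv track=rewrite | github.com/IMaeots/Python-Taltech-course | EX/ex04_validation/email_validation.py | is_valid_domain
-- ===== SOURCE A (Python) =====
-- def find_domain(email: str):
--     """Find the domain part of email."""
--     return email.split("@")[-1]
--
-- def is_valid_domain(email: str):
--     """Evaluate the correctness of domain name."""
--     domain = find_domain(email)
--
--     dot_count = 0
--     alpha_count = 0
--     for char in domain:
--         if char == ".":
--             dot_count += 1
--             if dot_count > 1:
--                 return False
--             elif alpha_count < 3 or alpha_count > 10:
--                 return False
--             else:
--                 alpha_count = 0
--         elif not char.isalpha():
--             return False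
--         else:
--             alpha_count += 1
--
--     if alpha_count < 2 or alpha_count > 5:
--         return False
--
--     return dot_count == 1
-- ===== SOURCE B (Python) =====
-- def is_valid_domain(email: str):
--     """Evaluate the correctness of domain name."""
--     parts = email.split("@")[-1].split(".")
--     if len(parts) != 2:
--         return False
--     first, second = parts
--     return (3 <= len(first) <= 10 and first.isalpha()
--             and 2 <= len(second) <= 5 and second.isalpha())
-- ===== Notes on version B (the rewrite author's own statement) =====
-- stated objective: simpler
-- what changed: Replaces the char-by-char counter state machine (dot_count/alpha_count with early returns) by split-then-check: split the domain on '.', require exactly two parts, and validate each part's length bounds and isalpha.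
import Mathlib
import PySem

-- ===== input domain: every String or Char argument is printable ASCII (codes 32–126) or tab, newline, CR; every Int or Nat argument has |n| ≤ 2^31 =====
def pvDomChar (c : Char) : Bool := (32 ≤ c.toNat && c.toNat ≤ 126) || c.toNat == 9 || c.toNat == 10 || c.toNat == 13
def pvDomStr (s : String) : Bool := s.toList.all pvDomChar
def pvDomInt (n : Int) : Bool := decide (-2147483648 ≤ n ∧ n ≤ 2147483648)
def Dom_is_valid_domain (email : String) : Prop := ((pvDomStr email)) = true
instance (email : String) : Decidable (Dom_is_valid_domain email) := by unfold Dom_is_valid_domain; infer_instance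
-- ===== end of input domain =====

-- B replaces A's char-by-char counter state machine by split-on-'.'-then-check-each-part (simpler decomposition, same O(n) cost).

-- ===== PORT A =====
-- A's loop with early returns: dot_count / alpha_count carried as Int, False returned as soon as a rule breaks
def pvLoopA : List Char → Int → Int → Bool
  | [], dc, ac => if ac < 2 || 5 < ac then false else dc == 1
  | c :: rest, dc, ac =>
    if c == '.' then
      if 1 < dc + 1 then false
      else if ac < 3 || 10 < ac then false
      else pvLoopA rest (dc + 1) 0
    else if !(PySem.Chars.isalpha c) then false
    else pvLoopA rest dc (ac + 1)

-- email.split("@")[-1]; split? is some ("@" ≠ "") and split never yields [], so both getD defaults are unreachable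
def find_domain (email : String) : String :=
  PySem.List.pyGetD ((PySem.Str.split? email "@").getD []) (-1) ""

def is_valid_domain (email : String) : Bool :=
  pvLoopA (find_domain email).toList 0 0

-- ===== PORT B =====
-- parts = email.split("@")[-1].split("."); exactly two parts, each length-bounded and isalpha
def is_valid_domain_alt (email : String) : Bool :=
  match (PySem.Chars.split? (PySem.List.pyGetD ((PySem.Str.split? email "@").getD []) (-1) "").toList ['.']).getD [] with
  | [first, second] =>
      decide (3 ≤ first.length) && decide (first.length ≤ 10) && PySem.Chars.strIsalpha first &&
      decide (2 ≤ second.length) && decide (second.length ≤ 5) && PySem.Chars.strIsalpha second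
  | _ => false

-- ===== PRECONDITION & SPEC =====
def Spec_is_valid_domain (email : String) (out : Bool) : Prop := out = is_valid_domain_alt email
instance (email : String) (out : Bool) : Decidable (Spec_is_valid_domain email out) := by unfold Spec_is_valid_domain; infer_instance

-- ===== CLAIM (what is proved, stated in full; the proofs are below) =====
def Claim_equal_is_valid_domain : Prop := ∀ (email : String), Dom_is_valid_domain email → Spec_is_valid_domain email (is_valid_domain email)

-- ===== LEMMAS AND PROOFS =====

-- functional model of splitting on '.' with an accumulator for the current piece
def pvParts : List Char → List Char → List (List Char)
  | [], cur => [cur.reverse]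
  | c :: rest, cur => if c = '.' then cur.reverse :: pvParts rest [] else pvParts rest (c :: cur)

-- B's check of the part after the dot
def pvTail : List (List Char) → Bool
  | [p1] => decide (2 ≤ p1.length) && decide (p1.length ≤ 5) && PySem.Chars.strIsalpha p1
  | _ => false

-- B's whole check on the split result
def pvCheck : List (List Char) → Bool
  | [p0, p1] =>
      decide (3 ≤ p0.length) && decide (p0.length ≤ 10) && PySem.Chars.strIsalpha p0 &&
      decide (2 ≤ p1.length) && decide (p1.length ≤ 5) && PySem.Chars.strIsalpha p1
  | _ => false

lemma pv_go_nil (fuel : Nat) (cur : List Char) (acc : List (List Char)) :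
    PySem.Chars.splitOn.go ['.'] fuel [] cur acc = (cur.reverse :: acc).reverse := by
  rw [PySem.Chars.splitOn.go.eq_def]; cases fuel <;> simp

lemma pv_go_cons (fuel : Nat) (c : Char) (rest cur : List Char) (acc : List (List Char)) :
    PySem.Chars.splitOn.go ['.'] (fuel + 1) (c :: rest) cur acc =
      (if c = '.' then PySem.Chars.splitOn.go ['.'] fuel rest [] (cur.reverse :: acc)
       else PySem.Chars.splitOn.go ['.'] fuel rest (c :: cur) acc) := by
  rw [PySem.Chars.splitOn.go.eq_def]
  by_cases hc : c = '.'
  · simp [List.isPrefixOf, hc]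
  · simp [List.isPrefixOf, hc]
    intro h; exact absurd h.symm hc

lemma pv_go_eq_pvParts (l : List Char) : ∀ (fuel : Nat), l.length < fuel → ∀ (cur : List Char) (acc : List (List Char)),
    PySem.Chars.splitOn.go ['.'] fuel l cur acc = acc.reverse ++ pvParts l cur := by
  induction l with
  | nil => intro fuel _ cur acc; rw [pv_go_nil]; simp [pvParts]
  | cons c rest ih =>
    intro fuel h cur acc
    cases fuel with
    | zero => omega
    | succ f =>
      rw [pv_go_cons]
      by_cases hc : c = '.'
      · simp [hc, pvParts, ih f (by simpa using h)]
      · simp [hc, pvParts, ih f (by simpa using h)]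

lemma pv_splitOn_eq (l : List Char) : PySem.Chars.splitOn l ['.'] = pvParts l [] := by
  unfold PySem.Chars.splitOn
  simpa using pv_go_eq_pvParts l (l.length + 1) (by omega) [] []

lemma pvParts_ne_nil (l cur : List Char) : pvParts l cur ≠ [] := by
  induction l generalizing cur with
  | nil => simp [pvParts]
  | cons c rest ih => by_cases hc : c = '.' <;> simp [pvParts, hc, ih]

lemma pvParts_shift (l : List Char) : ∀ (cur p : List Char) (ps : List (List Char)),
    pvParts l [] = p :: ps → pvParts l cur = (cur.reverse ++ p) :: ps := by
  induction l with
  | nil =>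
    intro cur p ps h
    simp only [pvParts] at h ⊢
    injection h with h1 h2
    simp [← h1, ← h2]
  | cons c rest ih =>
    intro cur p ps h
    by_cases hc : c = '.'
    · subst hc
      simp only [pvParts] at h ⊢
      injection h with h1 h2
      simp [← h1, ← h2]
    · simp only [pvParts, if_neg hc] at h ⊢
      obtain ⟨q, qs, hq⟩ := List.exists_cons_of_ne_nil (pvParts_ne_nil rest [])
      have h1 := ih [c] q qs hq
      have h2 := ih (c :: cur) q qs hq
      rw [h1] at h
      injection h with ha hb
      rw [h2, ← ha, ← hb]
      simp

lemma pvCheck_cons (q : List Char) (rest : List (List Char)) (h : rest ≠ []) :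
    pvCheck (q :: rest) =
      ((decide (3 ≤ q.length) && decide (q.length ≤ 10) && PySem.Chars.strIsalpha q) && pvTail rest) := by
  match rest with
  | [p1] => simp [pvCheck, pvTail, Bool.and_assoc]
  | p1 :: p2 :: ps => simp [pvCheck, pvTail]

lemma pv_L3 (l : List Char) : ∀ (cur : List Char), cur.all PySem.Chars.isalpha = true →
    pvLoopA l 1 (cur.length : Int) = pvTail (pvParts l cur) := by
  induction l with
  | nil =>
    intro cur h
    cases cur with
    | nil => decide
    | cons a as =>
      have hsa : PySem.Chars.strIsalpha (a :: as).reverse = true := by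
        simp_all [PySem.Chars.strIsalpha, List.all_reverse]
      have hgen : ∀ n : Nat,
          (if (decide ((n : Int) < 2) || decide (5 < (n : Int))) = true
           then false else ((1 : Int) == 1))
            = (decide (2 ≤ n) && decide (n ≤ 5)) := by
        intro n; rw [Bool.eq_iff_iff]; split_ifs with hb <;> simp_all <;> omega
      simp only [pvLoopA, pvParts, pvTail, hsa, Bool.and_true, List.length_reverse]
      exact hgen (a :: as).length
  | cons c r ih =>
    intro cur h
    by_cases hc : c = '.'
    · subst hc
      obtain ⟨p, ps, hp⟩ := List.exists_cons_of_ne_nil (pvParts_ne_nil r [])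
      simp [pvLoopA, pvParts, hp, pvTail]
    · by_cases ha : PySem.Chars.isalpha c
      · have key := ih (c :: cur) (by simp [h, ha])
        push_cast at key
        simp [pvLoopA, hc, ha, pvParts]
        simpa using key
      · obtain ⟨p, ps, hp⟩ := List.exists_cons_of_ne_nil (pvParts_ne_nil r [])
        have h2 := pvParts_shift r (c :: cur) p ps hp
        simp [pvLoopA, hc, ha, pvParts, h2]
        cases ps with
        | nil => simp [pvTail, PySem.Chars.strIsalpha, ha]
        | cons _ _ => simp [pvTail]

lemma pv_L2 (l : List Char) : ∀ (cur : List Char), cur.all PySem.Chars.isalpha = true →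
    pvLoopA l 0 (cur.length : Int) = pvCheck (pvParts l cur) := by
  induction l with
  | nil =>
    intro cur h
    simp only [pvLoopA, pvParts, pvCheck]
    split_ifs <;> rfl
  | cons c r ih =>
    intro cur h
    by_cases hc : c = '.'
    · subst hc
      have hT := pv_L3 r [] rfl
      simp only [List.length_nil, Nat.cast_zero] at hT
      have lhs : pvLoopA ('.' :: r) 0 (cur.length : Int) =
          (if (decide ((cur.length : Int) < 3) || decide (10 < (cur.length : Int))) = true
           then false else pvLoopA r 1 0) := by
        simp [pvLoopA, show (0:Int) + 1 = 1 from by norm_num]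
      have rhs : pvParts ('.' :: r) cur = cur.reverse :: pvParts r [] := by
        simp [pvParts]
      rw [lhs, rhs, pvCheck_cons _ _ (pvParts_ne_nil r []), ← hT]
      by_cases hcur : cur = []
      · subst hcur
        simp [PySem.Chars.strIsalpha]
      · have hsa : PySem.Chars.strIsalpha cur.reverse = true := by
          simp [PySem.Chars.strIsalpha, List.all_reverse, h, hcur]
        simp only [hsa, Bool.and_true]
        cases hTv : pvLoopA r 1 0 <;>
          · rw [Bool.eq_iff_iff]
            split_ifs with hb <;> (try simp_all) <;> omega
    · by_cases ha : PySem.Chars.isalpha c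
      · have key := ih (c :: cur) (by simp [h, ha])
        push_cast at key
        simp [pvLoopA, hc, ha, pvParts]
        simpa using key
      · obtain ⟨p, ps, hp⟩ := List.exists_cons_of_ne_nil (pvParts_ne_nil r [])
        have h2 := pvParts_shift r (c :: cur) p ps hp
        simp [pvLoopA, hc, ha, pvParts, h2]
        cases ps with
        | nil => simp [pvCheck]
        | cons p2 ps2 =>
          cases ps2 with
          | nil => simp [pvCheck, PySem.Chars.strIsalpha, ha]
          | cons _ _ => simp [pvCheck]

lemma pv_key (cs : List Char) :
    pvLoopA cs 0 0 = pvCheck ((PySem.Chars.split? cs ['.']).getD []) := by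
  have h := pv_L2 cs [] rfl
  simpa [PySem.Chars.split?, pv_splitOn_eq] using h

lemma pv_alt_eq (email : String) :
    is_valid_domain_alt email =
      pvCheck ((PySem.Chars.split? (PySem.List.pyGetD ((PySem.Str.split? email "@").getD []) (-1) "").toList ['.']).getD []) := by
  unfold is_valid_domain_alt
  match h : (PySem.Chars.split? (PySem.List.pyGetD ((PySem.Str.split? email "@").getD []) (-1) "").toList ['.']).getD [] with
  | [] => rfl
  | [a] => rfl
  | [a, b] => rfl
  | a :: b :: c :: ds => rfl

-- ===== VERDICT (by name: the statement is the Claim_ definition above) =====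
theorem is_valid_domain_spec : Claim_equal_is_valid_domain := by
  intro email _
  unfold Spec_is_valid_domain
  rw [pv_alt_eq]
  unfold is_valid_domain find_domain
  exact pv_key _
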